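-- pv_equiv track=rewrite | github.com/SimaLeSeul/normfixer | build/lib/normfixer/fixers/preprocessor.py | fix_preprocessor
-- ===== SOURCE A (Python) =====
-- def fix_preprocessor(lines):
--     """Ajoute une ligne vide après les directives préprocesseur"""
--     fixed = []
--     last_was_preprocessor = False
--
--     for line in lines:
--         stripped = line.strip()
--
--         if stripped.startswith("#"):
--             fixed.append(line)
--             last_was_preprocessor = True
--         else:
--             if last_was_preprocessor and stripped:
--                 fixed.append("")  # ✅ Ligne vide (pas \n)
--
--             fixed.append(line)
--             last_was_preprocessor = False
--
--     return fixed
-- ===== SOURCE B (Python) =====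
-- def fix_preprocessor(lines):
--     """Ajoute une ligne vide apres les directives preprocesseur"""
--     def tag(line):
--         s = line.strip()
--         return 'd' if s.startswith('#') else ('e' if not s else 'c')
--     marked = ''.join(map(tag, lines)).replace('dc', 'dxc')
--     it = iter(lines)
--     return ['' if t == 'x' else next(it) for t in marked]
-- ===== Notes on version B (the rewrite author's own statement) =====
-- stated objective: alternative
-- what changed: Replaces the stateful single-pass flag loop by a staged pipeline: classify every line into a one-char tag, mark the directive-to-code boundaries with a string replace('dc','dxc'), then reassemble the output by walking the marked tag string and consuming the original lines.
import Mathlib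
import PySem

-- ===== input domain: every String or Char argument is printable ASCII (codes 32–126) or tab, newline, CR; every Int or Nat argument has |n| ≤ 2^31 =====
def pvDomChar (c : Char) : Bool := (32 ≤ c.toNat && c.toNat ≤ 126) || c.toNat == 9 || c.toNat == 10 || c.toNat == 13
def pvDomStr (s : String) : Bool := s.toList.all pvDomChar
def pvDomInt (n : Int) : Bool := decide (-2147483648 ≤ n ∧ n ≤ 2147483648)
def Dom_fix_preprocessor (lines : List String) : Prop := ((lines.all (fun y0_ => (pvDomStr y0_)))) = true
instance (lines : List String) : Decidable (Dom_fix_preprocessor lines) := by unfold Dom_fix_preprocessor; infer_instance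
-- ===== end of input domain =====

-- B replaces A's stateful flag loop by a staged pipeline (tag each line with one char, mark the
-- directive-to-code boundaries with replace("dc","dxc"), reassemble); objective: alternative.


-- ===== PORT A =====
def pvStepA (st : List String × Bool) (line : String) : List String × Bool :=
  let stripped := PySem.Str.strip line
  if PySem.Str.startswith stripped "#" then
    (st.1 ++ [line], true)
  else
    let fixed := if st.2 && !(stripped == "") then st.1 ++ [""] else st.1
    (fixed ++ [line], false)

def fix_preprocessor (lines : List String) : List String :=
  (lines.foldl pvStepA ([], false)).1

-- ===== PORT B =====
-- tag(line): 'd' directive, 'e' empty after strip, 'c' code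
def pvTag (line : String) : Char :=
  if PySem.Str.startswith (PySem.Str.strip line) "#" then 'd'
  else if PySem.Str.strip line == "" then 'e' else 'c'

-- the final comprehension with its iterator: 'x' emits "", any other tag consumes the next line
def pvRebuild : List Char → List String → List String
  | [], _ => []
  | t :: ts, ls =>
    if t = 'x' then "" :: pvRebuild ts ls
    else
      match ls with
      | [] => []            -- never reached: non-'x' tags never outnumber the lines
      | l :: ls' => l :: pvRebuild ts ls'

def fix_preprocessor_alt (lines : List String) : List String :=
  let marked := PySem.Str.replace (String.ofList (lines.map pvTag)) "dc" "dxc"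
  pvRebuild marked.toList lines

-- ===== PRECONDITION & SPEC =====
def Spec_fix_preprocessor (lines : List String) (out : List String) : Prop := out = fix_preprocessor_alt lines
instance (lines : List String) (out : List String) : Decidable (Spec_fix_preprocessor lines out) := by unfold Spec_fix_preprocessor; infer_instance

-- ===== CLAIM (what is proved, stated in full; the proofs are below) =====
def Claim_equal_fix_preprocessor : Prop := ∀ (lines : List String), Dom_fix_preprocessor lines → Spec_fix_preprocessor lines (fix_preprocessor lines)

-- ===== LEMMAS AND PROOFS =====
-- A's loop, written as structural recursion on the remaining lines together with the flag
def pvBuild (f : Bool) : List String → List String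
  | [] => []
  | l :: r =>
    if PySem.Str.startswith (PySem.Str.strip l) "#" then l :: pvBuild true r
    else (if f && !(PySem.Str.strip l == "") then [""] else []) ++ l :: pvBuild false r

theorem pvFoldl_build (ls : List String) (acc : List String) (f : Bool) :
    (ls.foldl pvStepA (acc, f)).1 = acc ++ pvBuild f ls := by
  induction ls generalizing acc f with
  | nil => simp [pvBuild]
  | cons l r ih =>
    simp only [List.foldl_cons]
    by_cases h : PySem.Chars.startswith (PySem.Chars.strip l.toList) ['#'] = true
    · have hs : pvStepA (acc, f) l = (acc ++ [l], true) := by simp [pvStepA, h]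
      rw [hs, ih]; simp [pvBuild, h]
    · have h' : PySem.Chars.startswith (PySem.Chars.strip l.toList) ['#'] = false := by
        simpa using h
      have hs : pvStepA (acc, f) l =
          ((if f && !(PySem.Str.strip l == "") then acc ++ [""] else acc) ++ [l], false) := by
        simp [pvStepA, h']
      rw [hs, ih]
      have hb : pvBuild f (l :: r) =
          (if f && !(PySem.Str.strip l == "") then [""] else []) ++ l :: pvBuild false r := by
        simp [pvBuild, h']
      rw [hb]
      split_ifs <;> simp

-- str.replace with pattern "dc" and replacement "dxc", as direct two-head recursion
def pvRepDC : List Char → List Char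
  | [] => []
  | [a] => [a]
  | a :: b :: r =>
    if a = 'd' ∧ b = 'c' then 'd' :: 'x' :: 'c' :: pvRepDC r
    else a :: pvRepDC (b :: r)

theorem pvRepDC_single (a : Char) : pvRepDC [a] = [a] := by rw [pvRepDC]

theorem pvRepDC_cons₂ (a b : Char) (r : List Char) :
    pvRepDC (a :: b :: r) =
      if a = 'd' ∧ b = 'c' then 'd' :: 'x' :: 'c' :: pvRepDC r else a :: pvRepDC (b :: r) := by
  rw [pvRepDC]

theorem pvGo_repDC (fuel : Nat) (l acc : List Char) (hf : l.length ≤ fuel) :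
    PySem.Chars.replace.go ['d', 'c'] ['d', 'x', 'c'] fuel l acc = acc.reverse ++ pvRepDC l := by
  induction fuel generalizing l acc with
  | zero =>
    have : l = [] := List.eq_nil_of_length_eq_zero (Nat.le_zero.mp hf)
    subst this; simp [PySem.Chars.replace.go, pvRepDC]
  | succ n ih =>
    cases l with
    | nil => simp [PySem.Chars.replace.go, pvRepDC]
    | cons c t =>
      rw [PySem.Chars.replace.go]
      by_cases hp : List.isPrefixOf ['d', 'c'] (c :: t) = true
      · cases t with
        | nil => simp [List.isPrefixOf] at hp
        | cons b t' =>
          simp [List.isPrefixOf] at hp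
          obtain ⟨rfl, rfl⟩ := hp
          simp only [if_pos (by simp [List.isPrefixOf] : List.isPrefixOf ['d','c'] ('d'::'c'::t') = true),
            List.length_cons, List.length_nil, List.drop_succ_cons, List.drop_zero]
          rw [ih t' _ (by simp at hf; omega)]
          simp [pvRepDC]
      · rw [if_neg hp]
        rw [ih t _ (by simp at hf; omega)]
        cases t with
        | nil => simp [pvRepDC]
        | cons b t' =>
          have hne : ¬(c = 'd' ∧ b = 'c') := by
            rintro ⟨rfl, rfl⟩; exact hp (by simp [List.isPrefixOf])
          rw [pvRepDC_cons₂, if_neg hne]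
          simp

theorem pvReplace_repDC (l : List Char) :
    PySem.Chars.replace l ['d', 'c'] ['d', 'x', 'c'] = pvRepDC l := by
  rw [PySem.Chars.replace, if_neg (by simp)]
  exact pvGo_repDC l.length l [] le_rfl

theorem pvTag_d (l : String) :
    pvTag l = 'd' ↔ PySem.Chars.startswith (PySem.Chars.strip l.toList) ['#'] = true := by
  unfold pvTag
  split_ifs with h1 h2 <;> simp_all

theorem pvTag_ne_x (l : String) : pvTag l ≠ 'x' := by
  unfold pvTag; split_ifs <;> decide

-- when the next line is not code, the pending flag makes no difference
theorem pvBuild_true_eq_false (l : String) (r : List String) (h : pvTag l ≠ 'c') :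
    pvBuild true (l :: r) = pvBuild false (l :: r) := by
  by_cases hd : PySem.Chars.startswith (PySem.Chars.strip l.toList) ['#'] = true
  · simp [pvBuild, hd]
  · have hd' : PySem.Chars.startswith (PySem.Chars.strip l.toList) ['#'] = false := by
      simpa using hd
    have he : (PySem.Str.strip l == "") = true := by
      by_contra hc
      apply h
      unfold pvTag
      rw [if_neg (by simpa using hd), if_neg (by simpa using hc)]
    simp [pvBuild, hd', he]

theorem pvMain (n : Nat) (ls : List String) (hn : ls.length ≤ n) :
    pvBuild false ls = pvRebuild (pvRepDC (ls.map pvTag)) ls := by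
  induction n generalizing ls with
  | zero =>
    have : ls = [] := List.eq_nil_of_length_eq_zero (Nat.le_zero.mp hn)
    subst this; simp [pvBuild, pvRepDC, pvRebuild]
  | succ n ih =>
    cases ls with
    | nil => simp [pvBuild, pvRepDC, pvRebuild]
    | cons l r =>
      by_cases hd : pvTag l = 'd'
      · have hds := (pvTag_d l).mp hd
        have hb : pvBuild false (l :: r) = l :: pvBuild true r := by simp [pvBuild, hds]
        rw [hb]
        cases r with
        | nil => simp [pvBuild, hd, pvRepDC, pvRebuild]
        | cons l2 r2 =>
          by_cases hc : pvTag l2 = 'c'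
          · -- directive followed by code: this is where replace put the 'x'
            have hnd : PySem.Chars.startswith (PySem.Chars.strip l2.toList) ['#'] = false := by
              by_contra hh
              rw [(pvTag_d l2).mpr (by simpa using hh)] at hc; simp at hc
            have hne : (PySem.Str.strip l2 == "") = false := by
              by_contra hh
              unfold pvTag at hc
              rw [if_neg (by simpa using hnd), if_pos (by simpa using hh)] at hc
              simp at hc
            have hbt : pvBuild true (l2 :: r2) = "" :: l2 :: pvBuild false r2 := by
              simp [pvBuild, hnd, hne]
            rw [hbt, ih r2 (by simp at hn; omega)]
            simp only [List.map_cons, hd, hc]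
            rw [pvRepDC_cons₂, if_pos ⟨rfl, rfl⟩]
            simp [pvRebuild]
          · -- directive not followed by code: no insertion, the pending flag is irrelevant
            rw [pvBuild_true_eq_false l2 r2 hc, ih (l2 :: r2) (by simp at hn ⊢; omega)]
            simp only [List.map_cons, hd]
            rw [pvRepDC_cons₂, if_neg (by rintro ⟨-, h2⟩; exact hc h2)]
            simp [pvRebuild]
      · have hd' : PySem.Chars.startswith (PySem.Chars.strip l.toList) ['#'] = false := by
          by_contra hh
          exact hd ((pvTag_d l).mpr (by simpa using hh))
        have hb : pvBuild false (l :: r) = l :: pvBuild false r := by simp [pvBuild, hd']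
        rw [hb, ih r (by simp at hn; omega)]
        cases r with
        | nil =>
          simp only [List.map_cons, List.map_nil]
          rw [pvRepDC_single]
          have h0 : pvRepDC [] = [] := by rw [pvRepDC]
          simp [pvRebuild, pvTag_ne_x l, h0]
        | cons l2 r2 =>
          simp only [List.map_cons]
          rw [pvRepDC_cons₂, if_neg (by rintro ⟨h1, -⟩; exact hd h1)]
          simp [pvRebuild, pvTag_ne_x l]

-- ===== VERDICT (by name: the statement is the Claim_ definition above) =====
theorem fix_preprocessor_spec : Claim_equal_fix_preprocessor := by
  intro lines _
  unfold Spec_fix_preprocessor fix_preprocessor fix_preprocessor_alt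
  rw [pvFoldl_build lines [] false]
  simp only [List.nil_append]
  have e1 : ("dc" : String).toList = ['d', 'c'] := rfl
  have e2 : ("dxc" : String).toList = ['d', 'x', 'c'] := rfl
  simp only [PySem.Str.replace, String.toList_ofList, e1, e2, pvReplace_repDC]
  exact pvMain lines.length lines le_rfl
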